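-- pv_equiv track=rewrite | github.com/moonknight324/Vantage_AI | src/core/prompt_engine.py | optimize_prompt
-- ===== SOURCE A (Python) =====
-- def optimize_prompt(prompt: str, max_length: int = 4000) -> str:
--     """Optimize prompt length and structure"""
--     if len(prompt) <= max_length:
--         return prompt
--
--     # Simple optimization: truncate context if too long
--     lines = prompt.split('\n')
--     optimized_lines = []
--     current_length = 0
--
--     for line in lines:
--         if current_length + len(line) > max_length:
--             break
--         optimized_lines.append(line)
--         current_length += len(line) + 1  # +1 for newline
--
--     return '\n'.join(optimized_lines)
-- ===== SOURCE B (Python) =====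
-- from itertools import accumulate
-- from bisect import bisect_right
--
-- def optimize_prompt(prompt: str, max_length: int = 4000) -> str:
--     """Optimize prompt length and structure"""
--     if len(prompt) <= max_length:
--         return prompt
--     lines = prompt.split('\n')
--     prefix = list(accumulate(len(l) + 1 for l in lines))
--     k = bisect_right(prefix, max_length + 1)
--     return '\n'.join(lines[:k])
-- ===== Notes on version B (the rewrite author's own statement) =====
-- stated objective: alternative
-- what changed: Replaces the break-on-budget accumulator loop with a prefix-sum table of cumulative line lengths and a bisect_right binary search to find the cutoff, then a single slice-and-join.
import Mathlib
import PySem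

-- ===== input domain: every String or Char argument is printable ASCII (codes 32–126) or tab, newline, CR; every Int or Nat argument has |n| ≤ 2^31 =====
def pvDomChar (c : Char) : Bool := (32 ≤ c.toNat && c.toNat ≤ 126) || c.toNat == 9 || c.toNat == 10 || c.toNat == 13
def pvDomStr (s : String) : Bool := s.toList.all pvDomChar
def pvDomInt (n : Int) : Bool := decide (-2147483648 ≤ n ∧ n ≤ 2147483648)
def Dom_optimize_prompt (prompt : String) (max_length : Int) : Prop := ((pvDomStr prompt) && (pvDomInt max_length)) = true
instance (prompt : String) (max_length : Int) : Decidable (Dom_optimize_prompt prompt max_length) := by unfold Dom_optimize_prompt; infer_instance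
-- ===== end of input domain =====

-- B replaces A's break-on-budget accumulator loop by a prefix-sum table plus a
-- bisect-style cutoff and one slice-and-join (objective: alternative, same cost).

-- ===== PORT A =====
-- the for-loop with break: structural recursion over the lines, carrying current_length
def pvLoopA (maxl : Int) : List String → Int → List String
  | [], _ => []
  | line :: rest, cur =>
    if cur + PySem.Str.len line > maxl then []
    else line :: pvLoopA maxl rest (cur + PySem.Str.len line + 1)

def optimize_prompt (prompt : String) (max_length : Int) : String :=
  if PySem.Str.len prompt ≤ max_length then prompt
  else
    let lines := (PySem.Str.split? prompt "\n").getD []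
    PySem.Str.join "\n" (pvLoopA max_length lines 0)

-- ===== PORT B =====
-- itertools.accumulate of (len(l)+1) over the lines
def pvAccum : List Int → Int → List Int
  | [], _ => []
  | x :: r, acc => (acc + x) :: pvAccum r (acc + x)

def optimize_prompt_alt (prompt : String) (max_length : Int) : String :=
  if PySem.Str.len prompt ≤ max_length then prompt
  else
    let lines := (PySem.Str.split? prompt "\n").getD []
    let prefix_ := pvAccum (lines.map (fun l => PySem.Str.len l + 1)) 0
    -- bisect_right on the (strictly increasing) prefix table = insertion point after
    -- all entries ≤ key; ported as the length of the ≤-key prefix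
    let k := (prefix_.takeWhile (fun x => x ≤ max_length + 1)).length
    PySem.Str.join "\n" (lines.take k)

-- ===== PRECONDITION & SPEC =====
def Spec_optimize_prompt (prompt : String) (max_length : Int) (out : String) : Prop := out = optimize_prompt_alt prompt max_length
instance (prompt : String) (max_length : Int) (out : String) : Decidable (Spec_optimize_prompt prompt max_length out) := by unfold Spec_optimize_prompt; infer_instance

-- ===== CLAIM (what is proved, stated in full; the proofs are below) =====
def Claim_equal_optimize_prompt : Prop := ∀ (prompt : String) (max_length : Int), Dom_optimize_prompt prompt max_length → Spec_optimize_prompt prompt max_length (optimize_prompt prompt max_length)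

-- ===== LEMMAS AND PROOFS =====
-- A's loop takes exactly the lines whose cumulative (len+1) stays ≤ maxl+1
theorem pvLoopA_eq_take (maxl : Int) (lines : List String) (cur : Int) :
    pvLoopA maxl lines cur =
      lines.take ((pvAccum (lines.map (fun l => PySem.Str.len l + 1)) cur).takeWhile
        (fun x => x ≤ maxl + 1)).length := by
  induction lines generalizing cur with
  | nil => simp [pvLoopA, pvAccum]
  | cons line rest ih =>
    simp only [List.map_cons, pvAccum, List.takeWhile_cons, pvLoopA]
    by_cases h : cur + PySem.Str.len line > maxl
    · have hd : decide (cur + (PySem.Str.len line + 1) ≤ maxl + 1) = false :=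
        decide_eq_false (by omega)
      rw [if_pos h, hd]
      simp
    · have hd : decide (cur + (PySem.Str.len line + 1) ≤ maxl + 1) = true :=
        decide_eq_true (by omega)
      rw [if_neg h, hd]
      have e : cur + (PySem.Str.len line + 1) = cur + PySem.Str.len line + 1 := by ring
      simp only [if_true, List.length_cons, List.take_succ_cons]
      rw [ih, e]

theorem optimize_prompt_spec' (prompt : String) (max_length : Int) :
    optimize_prompt prompt max_length = optimize_prompt_alt prompt max_length := by
  unfold optimize_prompt optimize_prompt_alt
  simp only [pvLoopA_eq_take]

-- ===== VERDICT (by name: the statement is the Claim_ definition above) =====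
theorem optimize_prompt_spec : Claim_equal_optimize_prompt :=
  fun prompt max_length _ => optimize_prompt_spec' prompt max_length
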